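-- pv_equiv track=rewrite | github.com/Aruljo55/HackerranK | maxarea.py | getMaxArea
-- ===== SOURCE A (Python) =====
-- def getMaxArea(w, h, isVertical, distance):
--     vertical_cuts = {0, w}
--     horizontal_cuts = {0, h}
--     max_areas = []
--
--     for i in range(len(isVertical)):
--         if isVertical[i] == 1:
--             vertical_cuts.add(distance[i])
--         else:
--             horizontal_cuts.add(distance[i])
--
--         sorted_vertical = sorted(vertical_cuts)
--         sorted_horizontal = sorted(horizontal_cuts)
--
--         max_width = max(sorted_vertical[i+1] - sorted_vertical[i] for i in range(len(sorted_vertical) - 1))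
--         max_height = max(sorted_horizontal[i+1] - sorted_horizontal[i] for i in range(len(sorted_horizontal) - 1))
--
--         max_areas.append(max_width * max_height)
--
--     return max_areas
-- ===== SOURCE B (Python) =====
-- def _insert(sl, x):
--     # insert x into the sorted list sl, keeping it sorted and duplicate-free
--     i = 0
--     while i < len(sl) and sl[i] < x:
--         i += 1
--     if i < len(sl) and sl[i] == x:
--         return sl
--     return sl[:i] + [x] + sl[i:]
--
--
-- def _max_gap(sl):
--     best = 0
--     prev = sl[0]
--     for c in sl[1:]:
--         if c - prev > best:
--             best = c - prev
--         prev = c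
--     return best
--
--
-- def getMaxArea(w, h, isVertical, distance):
--     vsl = _insert([0], w)
--     hsl = _insert([0], h)
--     res = []
--     for v, d in zip(isVertical, distance):
--         if v == 1:
--             vsl = _insert(vsl, d)
--         else:
--             hsl = _insert(hsl, d)
--         res.append(_max_gap(vsl) * _max_gap(hsl))
--     return res
-- ===== Notes on version B (the rewrite author's own statement) =====
-- stated objective: alternative
-- what changed: Instead of rebuilding and re-sorting both cut sets with sorted(set) at every step, B maintains each cut list sorted and duplicate-free by a single in-order insertion per step and finds the max gap with one linear scan, dropping the per-step sort.
import Mathlib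
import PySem

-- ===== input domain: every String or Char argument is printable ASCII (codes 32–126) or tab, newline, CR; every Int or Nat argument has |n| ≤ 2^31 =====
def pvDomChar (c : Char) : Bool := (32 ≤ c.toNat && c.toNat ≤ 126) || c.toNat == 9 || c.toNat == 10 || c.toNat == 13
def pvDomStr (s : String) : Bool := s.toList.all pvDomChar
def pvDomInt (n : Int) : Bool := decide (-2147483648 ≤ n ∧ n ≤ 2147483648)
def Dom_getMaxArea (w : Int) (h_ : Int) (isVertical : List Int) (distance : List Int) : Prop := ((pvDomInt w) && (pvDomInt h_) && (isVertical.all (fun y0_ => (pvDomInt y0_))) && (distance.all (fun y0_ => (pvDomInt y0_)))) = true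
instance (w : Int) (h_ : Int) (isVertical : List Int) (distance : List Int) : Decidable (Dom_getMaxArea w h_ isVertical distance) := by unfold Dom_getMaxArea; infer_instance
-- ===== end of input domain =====

-- B drops A's per-step `sorted(set)` rebuild: it keeps each cut list sorted and duplicate-free by
-- one in-order insertion per step and takes the max gap with a single linear scan.

-- ===== PORT A =====
-- max(gen) over the gap generator; [] = ValueError (excluded by Pre_), where the port returns 0
def pvMaxOfA (l : List Int) : Int :=
  match l with
  | [] => 0
  | x :: xs => xs.foldl max x

-- the generator (sorted[i+1] - sorted[i] for i in range(len(sorted) - 1))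
def pvGapsA (sl : List Int) : List Int :=
  (PySem.List.pyRange 0 ((sl.length : Int) - 1) 1).map
    (fun i => PySem.List.pyGetD sl (i + 1) 0 - PySem.List.pyGetD sl i 0)

def getMaxArea (w : Int) (h_ : Int) (isVertical : List Int) (distance : List Int) : List Int :=
  ((PySem.List.pyRange 0 (isVertical.length : Int) 1).foldl
    (fun (st : List Int × List Int × List Int) i =>
      let vc := if PySem.List.pyGetD isVertical i 0 == 1
                then PySem.Set.add st.1 (PySem.List.pyGetD distance i 0) else st.1
      let hc := if PySem.List.pyGetD isVertical i 0 == 1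
                then st.2.1 else PySem.Set.add st.2.1 (PySem.List.pyGetD distance i 0)
      let maxW := pvMaxOfA (pvGapsA (PySem.List.sorted vc (fun x => x) false))
      let maxH := pvMaxOfA (pvGapsA (PySem.List.sorted hc (fun x => x) false))
      (vc, hc, st.2.2 ++ [maxW * maxH]))
    (PySem.Set.ofList [0, w], PySem.Set.ofList [0, h_], ([] : List Int))).2.2

-- ===== PORT B =====
-- the `while i < len(sl) and sl[i] < x: i += 1` scan of _insert
def pvInsIdx : List Int → Int → Nat
  | [], _ => 0
  | a :: t, x => if a < x then pvInsIdx t x + 1 else 0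

-- _insert; `i < len(sl) and sl[i] == x` is exact as `pyGet? sl i == some x` (none ≠ some x, 0 ≤ i);
-- the slices sl[:i] / sl[i:] with 0 ≤ i are take/drop
def pvInsert (sl : List Int) (x : Int) : List Int :=
  let i := pvInsIdx sl x
  if PySem.List.pyGet? sl (i : Int) == some x then sl
  else sl.take i ++ [x] ++ sl.drop i

-- _max_gap; sl[0] on [] would be IndexError (unreachable: B's lists are never empty), port uses pyGetD
def pvMaxGapB (sl : List Int) : Int :=
  ((sl.drop 1).foldl
    (fun (bp : Int × Int) c => (if c - bp.2 > bp.1 then c - bp.2 else bp.1, c))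
    (0, PySem.List.pyGetD sl 0 0)).1

def getMaxArea_alt (w : Int) (h_ : Int) (isVertical : List Int) (distance : List Int) : List Int :=
  ((isVertical.zip distance).foldl
    (fun (st : List Int × List Int × List Int) p =>
      let vsl := if p.1 == 1 then pvInsert st.1 p.2 else st.1
      let hsl := if p.1 == 1 then st.2.1 else pvInsert st.2.1 p.2
      (vsl, hsl, st.2.2 ++ [pvMaxGapB vsl * pvMaxGapB hsl]))
    (pvInsert [0] w, pvInsert [0] h_, ([] : List Int))).2.2

-- ===== PRECONDITION & SPEC =====
-- Pre_ is exactly where Python A returns: distance at least as long as isVertical (else IndexError),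
-- and if the loop runs, neither cut set is a singleton after the first step (else max() ValueError;
-- the sets only grow, so the first step is the only place this can start to fail).
def Pre_getMaxArea (w : Int) (h_ : Int) (isVertical : List Int) (distance : List Int) : Prop :=
  isVertical.length ≤ distance.length ∧
  (isVertical ≠ [] →
    ((w ≠ 0 ∨ (isVertical.headD 0 = 1 ∧ distance.headD 0 ≠ 0)) ∧
     (h_ ≠ 0 ∨ (isVertical.headD 0 ≠ 1 ∧ distance.headD 0 ≠ 0))))
instance (w : Int) (h_ : Int) (isVertical : List Int) (distance : List Int) : Decidable (Pre_getMaxArea w h_ isVertical distance) := by unfold Pre_getMaxArea; infer_instance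

def pvWitness_getMaxArea : Int × Int × List Int × List Int := (4, 3, [1, 0, 1], [2, 1, 3])

def Spec_getMaxArea (w : Int) (h_ : Int) (isVertical : List Int) (distance : List Int) (out : List Int) : Prop := out = getMaxArea_alt w h_ isVertical distance
instance (w : Int) (h_ : Int) (isVertical : List Int) (distance : List Int) (out : List Int) : Decidable (Spec_getMaxArea w h_ isVertical distance out) := by unfold Spec_getMaxArea; infer_instance

-- ===== CLAIM (what is proved, stated in full; the proofs are below) =====
def Claim_equal_getMaxArea : Prop := ∀ (w : Int) (h_ : Int) (isVertical : List Int) (distance : List Int), Dom_getMaxArea w h_ isVertical distance → Pre_getMaxArea w h_ isVertical distance → Spec_getMaxArea w h_ isVertical distance (getMaxArea w h_ isVertical distance)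

-- ===== LEMMAS AND PROOFS =====

-- structural view of B's _insert
def pvInsS : List Int → Int → List Int
  | [], x => [x]
  | a :: t, x => if a < x then a :: pvInsS t x else if a = x then a :: t else x :: a :: t

-- consecutive differences of a list
def pvDiffs : List Int → List Int
  | a :: b :: t => (b - a) :: pvDiffs (b :: t)
  | _ => []

theorem pvInsert_eq_insS (sl : List Int) (x : Int) : pvInsert sl x = pvInsS sl x := by
  induction sl with
  | nil => simp [pvInsert, pvInsIdx, pvInsS, PySem.List.pyGet?_zero]
  | cons a t ih =>
    by_cases hax : a < x
    · simp only [pvInsS, if_pos hax, ← ih]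
      simp only [pvInsert, pvInsIdx, if_pos hax, PySem.List.pyGet?_natCast,
        List.getElem?_cons_succ, List.take_succ_cons, List.drop_succ_cons]
      split <;> simp
    · by_cases heq : a = x
      · simp [pvInsert, pvInsIdx, pvInsS, heq]
      · simp [pvInsert, pvInsIdx, pvInsS, hax, heq]

theorem mem_pvInsS (l : List Int) (x y : Int) : y ∈ pvInsS l x ↔ y = x ∨ y ∈ l := by
  induction l with
  | nil => simp [pvInsS]
  | cons a t ih =>
    by_cases hax : a < x
    · simp [pvInsS, hax, ih]; tauto
    · by_cases heq : a = x
      · subst heq; simp [pvInsS]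
      · simp [pvInsS, hax, heq]

theorem pairwise_pvInsS (l : List Int) (x : Int) (h : l.Pairwise (· < ·)) :
    (pvInsS l x).Pairwise (· < ·) := by
  induction l with
  | nil => simp [pvInsS]
  | cons a t ih =>
    obtain ⟨ha, ht⟩ := List.pairwise_cons.1 h
    by_cases hax : a < x
    · simp only [pvInsS, if_pos hax]
      refine List.pairwise_cons.2 ⟨?_, ih ht⟩
      intro y hy
      rcases (mem_pvInsS t x y).1 hy with rfl | hyt
      · exact hax
      · exact ha y hyt
    · by_cases heq : a = x
      · simpa [pvInsS, hax, heq] using h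
      · have hxa : x < a := by omega
        simp only [pvInsS, if_neg hax, if_neg heq]
        refine List.pairwise_cons.2 ⟨?_, h⟩
        intro y hy
        rcases List.mem_cons.1 hy with rfl | hyt
        · exact hxa
        · exact lt_trans hxa (ha y hyt)

theorem perm_pvInsS (l : List Int) (x : Int) (h : l.Pairwise (· < ·)) :
    (pvInsS l x).Perm (if x ∈ l then l else l ++ [x]) := by
  induction l with
  | nil => simp [pvInsS]
  | cons a t ih =>
    obtain ⟨ha, ht⟩ := List.pairwise_cons.1 h
    by_cases hax : a < x
    · have hne : a ≠ x := by omega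
      by_cases hxt : x ∈ t
      · have : x ∈ a :: t := List.mem_cons.2 (Or.inr hxt)
        simp only [pvInsS, if_pos hax, if_pos this]
        have := ih ht
        rw [if_pos hxt] at this
        exact this.cons a
      · have : x ∉ a :: t := by simp [hxt, Ne.symm hne]
        simp only [pvInsS, if_pos hax, if_neg this]
        have := ih ht
        rw [if_neg hxt] at this
        simpa using this.cons a
    · by_cases heq : a = x
      · subst heq
        simp [pvInsS]
      · have hxa : x < a := by omega
        have hxt : x ∉ t := fun hx => absurd (ha x hx) (by omega)
        have : x ∉ a :: t := by simp [hxt, Ne.symm heq]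
        simp only [pvInsS, if_neg hax, if_neg heq, if_neg this]
        exact (List.perm_append_singleton x (a :: t)).symm

theorem sorted_strict (vs : List Int) (hnd : vs.Nodup) :
    (PySem.List.sorted vs (fun x => x) false).Pairwise (· < ·) := by
  have hperm := PySem.List.sorted_perm vs (fun x => x) false
  have hnd' : (PySem.List.sorted vs (fun x => x) false).Nodup := hperm.nodup_iff.mpr hnd
  have hle := PySem.List.sorted_pairwise vs (fun x => x)
  exact (hle.and hnd').imp (fun h => lt_of_le_of_ne h.1 h.2)

theorem sorted_add (vs : List Int) (d : Int) (hnd : vs.Nodup) :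
    PySem.List.sorted (PySem.Set.add vs d) (fun x => x) false
      = pvInsS (PySem.List.sorted vs (fun x => x) false) d := by
  set sl := PySem.List.sorted vs (fun x => x) false with hsl
  have hsp : sl.Pairwise (· < ·) := sorted_strict vs hnd
  have hperm : sl.Perm vs := PySem.List.sorted_perm vs (fun x => x) false
  have hmem : d ∈ sl ↔ d ∈ vs := hperm.mem_iff
  apply PySem.List.sorted_eq_of_perm_of_pairwise_lt
  · -- (pvInsS sl d).Perm (Set.add vs d)
    refine (perm_pvInsS sl d hsp).trans ?_
    rw [show PySem.Set.add vs d = if PySem.Set.contains vs d then vs else vs ++ [d] from rfl]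
    by_cases hd : d ∈ vs
    · rw [if_pos (hmem.mpr hd), if_pos (by simpa [PySem.Set.contains] using hd)]
      exact hperm
    · rw [if_neg (fun hx => hd (hmem.mp hx)), if_neg (by simpa [PySem.Set.contains] using hd)]
      exact hperm.append_right [d]
  · exact pairwise_pvInsS sl d hsp

theorem nodup_add (s : List Int) (x : Int) (h : s.Nodup) : (PySem.Set.add s x).Nodup := by
  rw [show PySem.Set.add s x = if PySem.Set.contains s x then s else s ++ [x] from rfl]
  split
  · exact h
  · rename_i hc
    have hx : x ∉ s := by simpa [PySem.Set.contains] using hc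
    exact h.append (List.nodup_singleton x) (by simpa [List.disjoint_singleton] using hx)

theorem mem_add_of_mem (s : List Int) (x y : Int) (h : y ∈ s) : y ∈ PySem.Set.add s x :=
  (PySem.Set.mem_add s x y).2 (Or.inl h)

theorem pvDiffs_range : ∀ sl : List Int,
    (List.range (sl.length - 1)).map (fun k => sl.getD (k + 1) 0 - sl.getD k 0) = pvDiffs sl := by
  intro sl
  induction sl with
  | nil => simp [pvDiffs]
  | cons a t ih =>
    cases t with
    | nil => simp [pvDiffs]
    | cons b t' =>
      have hlen : (a :: b :: t').length - 1 = t'.length + 1 := by simp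
      rw [hlen, List.range_succ_eq_map]
      simp only [List.map_cons, List.map_map]
      have hlen' : (b :: t').length - 1 = t'.length := by simp
      rw [pvDiffs]
      congr 1

theorem pvGapsA_eq_diffs (sl : List Int) : pvGapsA sl = pvDiffs sl := by
  cases sl with
  | nil => decide
  | cons a t =>
    have hcast : (((a :: t).length : Int) - 1) = ((t.length : Nat) : Int) := by
      simp only [List.length_cons]; push_cast; omega
    rw [pvGapsA, hcast, PySem.List.pyRange_zero_natCast, List.map_map]
    have : ∀ k : Nat,
        PySem.List.pyGetD (a :: t) ((k : Int) + 1) 0 - PySem.List.pyGetD (a :: t) (k : Int) 0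
          = (a :: t).getD (k + 1) 0 - (a :: t).getD k 0 := by
      intro k
      have h1 : ((k : Int) + 1) = ((k + 1 : Nat) : Int) := by push_cast; ring
      rw [h1, PySem.List.pyGetD_natCast, PySem.List.pyGetD_natCast]
    calc ((List.range t.length).map fun k =>
            PySem.List.pyGetD (a :: t) ((fun k : Nat => (k : Int)) k + 1) 0 -
              PySem.List.pyGetD (a :: t) ((fun k : Nat => (k : Int)) k) 0)
        = (List.range t.length).map (fun k => (a :: t).getD (k + 1) 0 - (a :: t).getD k 0) := by
          apply List.map_congr_left; intro k _; exact this k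
      _ = pvDiffs (a :: t) := by
          have := pvDiffs_range (a :: t)
          simpa using this

theorem pvIfMax (b g : Int) : (if g > b then g else b) = max b g := by
  rw [max_def]; split_ifs <;> omega

theorem pvFoldGap : ∀ (t : List Int) (a b : Int),
    ((t.foldl (fun (bp : Int × Int) c => (if c - bp.2 > bp.1 then c - bp.2 else bp.1, c)) (b, a)).1)
      = (pvDiffs (a :: t)).foldl max b := by
  intro t
  induction t with
  | nil => intro a b; rfl
  | cons c t' ih =>
    intro a b
    show ((t'.foldl _ (if c - a > b then c - a else b, c)).1) = _
    rw [show pvDiffs (a :: c :: t') = (c - a) :: pvDiffs (c :: t') from rfl]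
    rw [List.foldl_cons, ← pvIfMax b (c - a)]
    exact ih c (if c - a > b then c - a else b)

theorem pvMaxGapB_eq (sl : List Int) (h : sl ≠ []) :
    pvMaxGapB sl = (pvDiffs sl).foldl max 0 := by
  cases sl with
  | nil => exact absurd rfl h
  | cons a t =>
    rw [pvMaxGapB]
    simp only [List.drop_one, List.tail_cons, PySem.List.pyGetD_zero_cons]
    exact pvFoldGap t a 0

theorem pvDiffs_pos (sl : List Int) (h : sl.Pairwise (· < ·)) :
    ∀ x ∈ pvDiffs sl, 0 < x := by
  induction sl with
  | nil => simp [pvDiffs]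
  | cons a t ih =>
    cases t with
    | nil => simp [pvDiffs]
    | cons b t' =>
      obtain ⟨ha, ht⟩ := List.pairwise_cons.1 h
      intro x hx
      rw [show pvDiffs (a :: b :: t') = (b - a) :: pvDiffs (b :: t') from rfl] at hx
      rcases List.mem_cons.1 hx with rfl | hx'
      · have : a < b := ha b (by simp)
        omega
      · exact ih ht x hx'

theorem maxA_eq_maxGapB (sl : List Int) (hp : sl.Pairwise (· < ·)) (hne : sl ≠ []) :
    pvMaxOfA (pvGapsA sl) = pvMaxGapB sl := by
  rw [pvGapsA_eq_diffs, pvMaxGapB_eq sl hne]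
  cases hd : pvDiffs sl with
  | nil => rfl
  | cons x xs =>
    have hx : 0 < x := pvDiffs_pos sl hp x (by rw [hd]; exact List.mem_cons_self ..)
    show xs.foldl max x = (x :: xs).foldl max 0
    rw [List.foldl_cons, max_eq_right hx.le]

-- the per-pair step functions the two folds reduce to
def pvStepA (st : List Int × List Int × List Int) (p : Int × Int) : List Int × List Int × List Int :=
  let vc := if p.1 == 1 then PySem.Set.add st.1 p.2 else st.1
  let hc := if p.1 == 1 then st.2.1 else PySem.Set.add st.2.1 p.2
  (vc, hc, st.2.2 ++ [pvMaxOfA (pvGapsA (PySem.List.sorted vc (fun x => x) false)) *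
                      pvMaxOfA (pvGapsA (PySem.List.sorted hc (fun x => x) false))])

def pvStepB (st : List Int × List Int × List Int) (p : Int × Int) : List Int × List Int × List Int :=
  let vsl := if p.1 == 1 then pvInsert st.1 p.2 else st.1
  let hsl := if p.1 == 1 then st.2.1 else pvInsert st.2.1 p.2
  (vsl, hsl, st.2.2 ++ [pvMaxGapB vsl * pvMaxGapB hsl])

def pvInv (sA sB : List Int × List Int × List Int) : Prop :=
  sB.1 = PySem.List.sorted sA.1 (fun x => x) false ∧
  sB.2.1 = PySem.List.sorted sA.2.1 (fun x => x) false ∧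
  sB.2.2 = sA.2.2 ∧ sA.1.Nodup ∧ sA.2.1.Nodup ∧ (0 : Int) ∈ sA.1 ∧ (0 : Int) ∈ sA.2.1

theorem pvArea_eq (vs : List Int) (sl : List Int)
    (hsl : sl = PySem.List.sorted vs (fun x => x) false)
    (hnd : vs.Nodup) (h0 : (0 : Int) ∈ vs) :
    pvMaxGapB sl = pvMaxOfA (pvGapsA (PySem.List.sorted vs (fun x => x) false)) := by
  subst hsl
  have hp := sorted_strict vs hnd
  have hne : PySem.List.sorted vs (fun x => x) false ≠ [] :=
    List.ne_nil_of_mem ((PySem.List.mem_sorted vs (fun x => x) false 0).2 h0)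
  exact (maxA_eq_maxGapB _ hp hne).symm

theorem pvStep_inv (sA sB : List Int × List Int × List Int) (p : Int × Int)
    (h : pvInv sA sB) : pvInv (pvStepA sA p) (pvStepB sB p) := by
  obtain ⟨h1, h2, h3, h4, h5, h6, h7⟩ := h
  cases hb : (p.1 == 1) with
  | true =>
    have hv : pvInsert sB.1 p.2
        = PySem.List.sorted (PySem.Set.add sA.1 p.2) (fun x => x) false := by
      rw [pvInsert_eq_insS, h1, sorted_add _ _ h4]
    refine ⟨?_, ?_, ?_, ?_, ?_, ?_, ?_⟩ <;>
      simp only [pvStepA, pvStepB, hb, if_true]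
    · exact hv
    · exact h2
    · rw [h3, pvArea_eq (PySem.Set.add sA.1 p.2) _ hv (nodup_add _ _ h4)
        (mem_add_of_mem _ _ _ h6), pvArea_eq sA.2.1 _ h2 h5 h7]
    · exact nodup_add _ _ h4
    · exact h5
    · exact mem_add_of_mem _ _ _ h6
    · exact h7
  | false =>
    have hh : pvInsert sB.2.1 p.2
        = PySem.List.sorted (PySem.Set.add sA.2.1 p.2) (fun x => x) false := by
      rw [pvInsert_eq_insS, h2, sorted_add _ _ h5]
    refine ⟨?_, ?_, ?_, ?_, ?_, ?_, ?_⟩ <;>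
      simp only [pvStepA, pvStepB, hb, if_false, Bool.false_eq_true]
    · exact h1
    · exact hh
    · rw [h3, pvArea_eq sA.1 _ h1 h4 h6, pvArea_eq (PySem.Set.add sA.2.1 p.2) _ hh
        (nodup_add _ _ h5) (mem_add_of_mem _ _ _ h7)]
    · exact h4
    · exact nodup_add _ _ h5
    · exact h6
    · exact mem_add_of_mem _ _ _ h7

theorem pvFold_inv (zs : List (Int × Int)) (sA sB : List Int × List Int × List Int)
    (h : pvInv sA sB) : pvInv (zs.foldl pvStepA sA) (zs.foldl pvStepB sB) := by
  induction zs generalizing sA sB with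
  | nil => exact h
  | cons p zs ih => exact ih _ _ (pvStep_inv sA sB p h)

theorem getMaxArea_fold (w h_ : Int) (iv dist : List Int) (hlen : iv.length ≤ dist.length) :
    getMaxArea w h_ iv dist =
      ((iv.zip dist).foldl pvStepA
        (PySem.Set.ofList [0, w], PySem.Set.ofList [0, h_], ([] : List Int))).2.2 := by
  have hz : (iv.zip dist).length = iv.length := by
    rw [List.length_zip]; omega
  rw [getMaxArea]
  rw [PySem.List.foldl_congr_mem _ _
    (fun st i => pvStepA st (PySem.List.pyGetD (iv.zip dist) i ((0 : Int), (0 : Int)))) _ ?_]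
  · rw [show ((iv.length : Nat) : Int) = (((iv.zip dist).length : Nat) : Int) by rw [hz],
      PySem.List.foldl_pyRange_zero_pyGetD']
  · intro acc i hi
    obtain ⟨hi0, hi1⟩ := PySem.List.mem_pyRange_one.1 hi
    have hiv : i < (iv.length : Int) := hi1
    have hid : i < (dist.length : Int) := by omega
    have hiz : i < ((iv.zip dist).length : Int) := by rw [hz]; exact hi1
    have hpz : PySem.List.pyGetD (iv.zip dist) i ((0 : Int), (0 : Int))
        = (PySem.List.pyGetD iv i 0, PySem.List.pyGetD dist i 0) := by
      rw [PySem.List.pyGetD_eq_getElem _ _ hi0 hiz,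
        PySem.List.pyGetD_eq_getElem _ _ hi0 hiv,
        PySem.List.pyGetD_eq_getElem _ _ hi0 hid,
        List.getElem_zip]
    show _ = pvStepA acc (PySem.List.pyGetD (iv.zip dist) i ((0 : Int), (0 : Int)))
    rw [hpz]
    rfl

theorem getMaxArea_alt_fold (w h_ : Int) (iv dist : List Int) :
    getMaxArea_alt w h_ iv dist =
      ((iv.zip dist).foldl pvStepB (pvInsert [0] w, pvInsert [0] h_, ([] : List Int))).2.2 := by
  rfl

theorem pvSorted_ofList_pair (v : Int) :
    pvInsert [0] v = PySem.List.sorted (PySem.Set.ofList [(0 : Int), v]) (fun x => x) false := by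
  have h1 : PySem.Set.ofList [(0 : Int), v] = PySem.Set.add ([0] : List Int) v := rfl
  have h2 : PySem.List.sorted ([(0 : Int)] : List Int) (fun x => x) false = [0] := rfl
  rw [h1, sorted_add ([0] : List Int) v (by simp), h2, pvInsert_eq_insS]

theorem pvInv_init (w h_ : Int) :
    pvInv (PySem.Set.ofList [0, w], PySem.Set.ofList [0, h_], ([] : List Int))
          (pvInsert [0] w, pvInsert [0] h_, ([] : List Int)) := by
  refine ⟨pvSorted_ofList_pair w, pvSorted_ofList_pair h_, rfl, ?_, ?_, ?_, ?_⟩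
  · exact PySem.Set.nodup_ofList _
  · exact PySem.Set.nodup_ofList _
  · exact (PySem.Set.mem_ofList _ _).2 (by simp)
  · exact (PySem.Set.mem_ofList _ _).2 (by simp)

-- ===== VERDICT (by name: the statement is the Claim_ definition above) =====
theorem getMaxArea_spec : Claim_equal_getMaxArea := by
  intro w h_ iv dist _ hpre
  unfold Spec_getMaxArea
  rw [getMaxArea_fold w h_ iv dist hpre.1, getMaxArea_alt_fold]
  exact ((pvFold_inv (iv.zip dist) _ _ (pvInv_init w h_)).2.2.1).symm
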